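-- pv_equiv track=rewrite | github.com/githmara/Rezyser-Audio-GPT | buduj_wielojezyczne_ui.py | podmien_top_comment
-- ===== SOURCE A (Python) =====
-- KOD_ZRODLOWY = "pl"
--
-- def _auto_naglowek(kod_jezyka: str) -> str:
--     """Buduje top-of-file komentarz dla wynikowego ui.yaml danego języka."""
--     return (
--         "# =============================================================================\n"
--         f"# dictionaries/{kod_jezyka}/gui/ui.yaml\n"
--         "#\n"
--         "# Plik wygenerowany automatycznie przez buduj_wielojezyczne_ui.py\n"
--         f"# ze źródła dictionaries/{KOD_ZRODLOWY}/gui/ui.yaml\n"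
--         "# (język bazowy PL, wersja 13.x). NIE edytuj ręcznie — zmiany\n"
--         "# wprowadzaj w pliku źródłowym PL i uruchom ponownie skrypt.\n"
--         "#\n"
--         "# Tłumaczone są WYŁĄCZNIE wartości; klucze, struktura, komentarze\n"
--         "# sekcyjne i style block-scalar (`|-`, `|`) są zachowane przez\n"
--         "# round-trip ruamel.yaml. Placeholdery {nazwa} i skróty \\tCtrl+...\n"
--         "# zostały zamrożone tokenami ⟦P{i}⟧/⟦S{j}⟧ na czas tłumaczenia,\n"
--         "# odtworzone 1:1 po weryfikacji parzystości multisetu markerów.\n"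
--         "# =============================================================================\n"
--         "\n"
--     )
--
-- def podmien_top_comment(yaml_str: str, kod_jezyka: str) -> str:
--     """Usuwa nagłówkowy blok komentarzy i wstawia auto-nagłówek.
--
--     Top-of-file w PL ui.yaml ma strukturę:
--       [komentarze nagłówkowe / konwencje]
--       <pusta linia>
--       [komentarz sekcyjny # APP – ...]
--       app: ...
--
--     Pierwsza pusta linia jest separatorem nagłówka — STOP tam, żeby
--     zachować sekcyjny komentarz `# APP – ...` (i jego separator).
--     Bez tego stop-warunku zjadalibyśmy też pierwszy sekcyjny komentarz,
--     a kolejne 7 (zaczepione do węzłów podrzędnych przez ruamel) zostają.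
--     """
--     linie = yaml_str.split("\n")
--     i = 0
--     while i < len(linie) and linie[i].lstrip().startswith("#"):
--         i += 1
--     # Pomiń ewentualną pojedynczą pustą linię — separator nagłówka.
--     # Auto-nagłówek ma już własną pustą linię na końcu, więc nie
--     # gubimy formatowania.
--     if i < len(linie) and linie[i].strip() == "":
--         i += 1
--     reszta = "\n".join(linie[i:])
--     return _auto_naglowek(kod_jezyka) + reszta
-- ===== SOURCE B (Python) =====
-- KOD_ZRODLOWY = "pl"
--
-- def _auto_naglowek(kod_jezyka: str) -> str:
--     """Buduje top-of-file komentarz dla wynikowego ui.yaml danego języka."""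
--     return (
--         "# =============================================================================\n"
--         f"# dictionaries/{kod_jezyka}/gui/ui.yaml\n"
--         "#\n"
--         "# Plik wygenerowany automatycznie przez buduj_wielojezyczne_ui.py\n"
--         f"# ze źródła dictionaries/{KOD_ZRODLOWY}/gui/ui.yaml\n"
--         "# (język bazowy PL, wersja 13.x). NIE edytuj ręcznie — zmiany\n"
--         "# wprowadzaj w pliku źródłowym PL i uruchom ponownie skrypt.\n"
--         "#\n"
--         "# Tłumaczone są WYŁĄCZNIE wartości; klucze, struktura, komentarze\n"
--         "# sekcyjne i style block-scalar (`|-`, `|`) są zachowane przez\n"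
--         "# round-trip ruamel.yaml. Placeholdery {nazwa} i skróty \\tCtrl+...\n"
--         "# zostały zamrożone tokenami ⟦P{i}⟧/⟦S{j}⟧ na czas tłumaczenia,\n"
--         "# odtworzone 1:1 po weryfikacji parzystości multisetu markerów.\n"
--         "# =============================================================================\n"
--         "\n"
--     )
--
-- def podmien_top_comment(yaml_str: str, kod_jezyka: str) -> str:
--     """Character-level scan: skip the leading comment block and at most one
--     blank separator line directly on the string, then slice it — no line
--     list is ever built."""
--     s = yaml_str
--     n = len(s)
--     i = 0
--     # skip leading comment lines
--     while True:
--         j = i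
--         while j < n and s[j].isspace() and s[j] != "\n":
--             j += 1
--         if j < n and s[j] == "#":
--             k = s.find("\n", j)
--             i = n if k == -1 else k + 1
--         else:
--             break
--     # skip at most one blank line (all-whitespace up to a newline or EOF)
--     j = i
--     while j < n and s[j].isspace() and s[j] != "\n":
--         j += 1
--     if j == n:
--         i = n
--     elif s[j] == "\n":
--         i = j + 1
--     return _auto_naglowek(kod_jezyka) + s[i:]
-- ===== Notes on version B (the rewrite author's own statement) =====
-- stated objective: alternative
-- what changed: A splits the text into a list of lines, scans it with an index-advancing while loop and rejoins the remainder with '\n'.join; B never builds a line list: it scans the string character by character (skip whitespace, test for '#', jump past the newline), skips at most one blank line the same way, and slices the original string once.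
import Mathlib
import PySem

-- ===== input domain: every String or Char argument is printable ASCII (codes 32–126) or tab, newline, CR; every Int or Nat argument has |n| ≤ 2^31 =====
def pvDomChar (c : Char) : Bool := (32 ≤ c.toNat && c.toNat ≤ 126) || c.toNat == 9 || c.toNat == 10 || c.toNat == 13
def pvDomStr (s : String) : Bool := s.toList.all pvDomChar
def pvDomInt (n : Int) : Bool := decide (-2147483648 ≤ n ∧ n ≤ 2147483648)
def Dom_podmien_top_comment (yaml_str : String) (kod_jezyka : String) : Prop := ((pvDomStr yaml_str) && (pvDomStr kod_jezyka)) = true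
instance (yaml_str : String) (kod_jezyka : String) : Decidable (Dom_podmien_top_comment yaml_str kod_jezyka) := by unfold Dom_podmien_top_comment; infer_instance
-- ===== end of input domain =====

-- B replaces A's split-into-lines / index loop / join by a direct character-level
-- scan that skips the leading comment block and one blank line on the string and
-- slices it (objective: alternative, no speed claim).

-- shared helper: Python's _auto_naglowek (used verbatim by both A and B)
def KOD_ZRODLOWY : String := "pl"

def autoNaglowek (kod_jezyka : String) : String :=
  "# =============================================================================\n"
  ++ "# dictionaries/" ++ kod_jezyka ++ "/gui/ui.yaml\n"
  ++ "#\n"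
  ++ "# Plik wygenerowany automatycznie przez buduj_wielojezyczne_ui.py\n"
  ++ "# ze źródła dictionaries/" ++ KOD_ZRODLOWY ++ "/gui/ui.yaml\n"
  ++ "# (język bazowy PL, wersja 13.x). NIE edytuj ręcznie — zmiany\n"
  ++ "# wprowadzaj w pliku źródłowym PL i uruchom ponownie skrypt.\n"
  ++ "#\n"
  ++ "# Tłumaczone są WYŁĄCZNIE wartości; klucze, struktura, komentarze\n"
  ++ "# sekcyjne i style block-scalar (`|-`, `|`) są zachowane przez\n"
  ++ "# round-trip ruamel.yaml. Placeholdery {nazwa} i skróty \\tCtrl+...\n"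
  ++ "# zostały zamrożone tokenami ⟦P{i}⟧/⟦S{j}⟧ na czas tłumaczenia,\n"
  ++ "# odtworzone 1:1 po weryfikacji parzystości multisetu markerów.\n"
  ++ "# =============================================================================\n"
  ++ "\n"

-- ===== PORT A =====
-- the while loop over `linie` counting leading comment lines, as structural recursion on the line list
def pvDropCommentsA : List (List Char) → List (List Char)
  | [] => []
  | l :: ls =>
    if PySem.Chars.startswith (PySem.Chars.lstrip l) ['#'] then pvDropCommentsA ls else l :: ls

-- `if i < len(linie) and linie[i].strip() == "": i += 1`
def pvDropBlankA : List (List Char) → List (List Char)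
  | [] => []
  | l :: ls => if PySem.Chars.strip l = [] then ls else l :: ls

def podmien_top_comment (yaml_str : String) (kod_jezyka : String) : String :=
  let linie := PySem.Chars.splitOn yaml_str.toList ['\n']
  let reszta := PySem.Chars.join ['\n'] (pvDropBlankA (pvDropCommentsA linie))
  autoNaglowek kod_jezyka ++ String.ofList reszta

-- ===== PORT B =====
-- `ch.isspace() and ch != "\n"`
def pvWsB (c : Char) : Bool := PySem.Chars.isspace c && !(c == '\n')

-- `k = s.find("\n", j); i = n if k == -1 else k + 1` as: drop up to the newline, then past it
def pvDropLine (u : List Char) : List Char :=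
  match u.dropWhile (fun c => !(c == '\n')) with
  | [] => []
  | _ :: r => r

theorem pvDropLine_le (c : Char) (u : List Char) : (pvDropLine (c :: u)).length ≤ u.length := by
  unfold pvDropLine
  simp only [List.dropWhile_cons]
  by_cases hc : (!(c == '\n')) = true
  · rw [if_pos hc]
    cases h : u.dropWhile (fun c => !(c == '\n')) with
    | nil => simp
    | cons d r =>
      show r.length ≤ u.length
      have hle := List.length_dropWhile_le (fun c => !(c == '\n')) u
      rw [h] at hle
      simp only [List.length_cons] at hle
      omega
  · rw [if_neg hc]

-- B's outer `while True` loop: at a whitespace-skipped position that holds '#',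
-- drop the rest of that line and continue; otherwise stop
def pvSkipComments (s : List Char) : List Char :=
  if h : (s.dropWhile pvWsB).head? = some '#' then
    pvSkipComments (pvDropLine (s.dropWhile pvWsB))
  else s
termination_by s.length
decreasing_by
  cases ht : s.dropWhile pvWsB with
  | nil => rw [ht] at h; exact absurd h (by simp)
  | cons c u =>
    have h1 : (c :: u).length ≤ s.length := by
      have := List.length_dropWhile_le pvWsB s; rw [ht] at this; exact this
    simp only [List.length_cons] at h1
    have h2 := pvDropLine_le c u
    omega

-- B's blank-line step: `j == n` / `s[j] == "\n"` after skipping whitespace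
def pvSkipBlank (s : List Char) : List Char :=
  match s.dropWhile pvWsB with
  | [] => []
  | c :: r => if c = '\n' then r else s

def podmien_top_comment_alt (yaml_str : String) (kod_jezyka : String) : String :=
  autoNaglowek kod_jezyka ++ String.ofList (pvSkipBlank (pvSkipComments yaml_str.toList))

-- ===== PRECONDITION & SPEC =====
def Spec_podmien_top_comment (yaml_str : String) (kod_jezyka : String) (out : String) : Prop := out = podmien_top_comment_alt yaml_str kod_jezyka
instance (yaml_str : String) (kod_jezyka : String) (out : String) : Decidable (Spec_podmien_top_comment yaml_str kod_jezyka out) := by unfold Spec_podmien_top_comment; infer_instance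

-- ===== CLAIM (what is proved, stated in full; the proofs are below) =====
def Claim_equal_podmien_top_comment : Prop := ∀ (yaml_str : String) (kod_jezyka : String), Dom_podmien_top_comment yaml_str kod_jezyka → Spec_podmien_top_comment yaml_str kod_jezyka (podmien_top_comment yaml_str kod_jezyka)

-- ===== LEMMAS AND PROOFS =====

-- proof-only model of s.split("\n"): one line at a time
def pvConsHead (c : Char) : List (List Char) → List (List Char)
  | [] => [[c]]
  | h :: t => (c :: h) :: t

def pvLines : List Char → List (List Char)
  | [] => [[]]
  | c :: r => if c = '\n' then [] :: pvLines r else pvConsHead c (pvLines r)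

theorem pvLines_ne_nil (s : List Char) : pvLines s ≠ [] := by
  cases s with
  | nil => simp [pvLines]
  | cons c r =>
    simp only [pvLines]
    split
    · simp
    · cases hp : pvLines r <;> simp [pvConsHead]

theorem pvLines_no_nl (s : List Char) : ∀ l ∈ pvLines s, '\n' ∉ l := by
  induction s with
  | nil => simp [pvLines]
  | cons c r ih =>
    intro l hl
    simp only [pvLines] at hl
    by_cases hc : c = '\n'
    · rw [if_pos hc] at hl
      rcases List.mem_cons.mp hl with h | h
      · simp [h]
      · exact ih l h
    · rw [if_neg hc] at hl
      cases hp : pvLines r with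
      | nil => exact absurd hp (pvLines_ne_nil r)
      | cons h t =>
        rw [hp] at hl
        simp only [pvConsHead] at hl
        rcases List.mem_cons.mp hl with he | ht2
        · subst he
          intro hmem
          rcases List.mem_cons.mp hmem with he2 | hm2
          · exact hc he2.symm
          · exact ih h (by rw [hp]; exact List.mem_cons_self) hm2
        · exact ih l (by rw [hp]; exact List.mem_cons_of_mem _ ht2)

theorem pvJoin_pvLines (s : List Char) : PySem.Chars.join ['\n'] (pvLines s) = s := by
  induction s with
  | nil => simp [pvLines, PySem.Chars.join_singleton]
  | cons c r ih =>
    simp only [pvLines]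
    by_cases hc : c = '\n'
    · rw [if_pos hc]
      subst hc
      cases hp : pvLines r with
      | nil => exact absurd hp (pvLines_ne_nil r)
      | cons h t =>
        rw [hp] at ih
        rw [PySem.Chars.join_cons_cons]
        simp [ih]
    · rw [if_neg hc]
      cases hp : pvLines r with
      | nil => exact absurd hp (pvLines_ne_nil r)
      | cons h t =>
        rw [hp] at ih
        simp only [pvConsHead]
        cases t with
        | nil =>
          rw [PySem.Chars.join_singleton] at ih ⊢
          simp [ih]
        | cons y t' =>
          rw [PySem.Chars.join_cons_cons] at ih
          rw [PySem.Chars.join_cons_cons]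
          simp only [List.cons_append, List.append_assoc] at ih ⊢
          rw [ih]

-- `splitOn s "\n"` computes exactly pvLines s
theorem pvGo_spec : ∀ (fuel : Nat) (l cur : List Char) (acc : List (List Char)), l.length < fuel →
    PySem.Chars.splitOn.go ['\n'] fuel l cur acc =
      acc.reverse ++ (match pvLines l with
        | [] => [cur.reverse]
        | h :: t => (cur.reverse ++ h) :: t) := by
  intro fuel
  induction fuel with
  | zero => intro l cur acc h; omega
  | succ f ih =>
    intro l cur acc hlen
    cases l with
    | nil =>
      rw [PySem.Chars.splitOn.go.eq_def]
      simp [pvLines]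
    | cons c rest =>
      rw [PySem.Chars.splitOn.go.eq_def]
      simp only [List.length_cons] at hlen
      by_cases hc : c = '\n'
      · subst hc
        have hpre : List.isPrefixOf ['\n'] ('\n' :: rest) = true := by
          simp [List.isPrefixOf]
        simp only [hpre, if_pos]
        have hdrop : List.drop ['\n'].length ('\n' :: rest) = rest := rfl
        rw [hdrop]
        rw [ih rest [] (cur.reverse :: acc) (by omega)]
        cases hp : pvLines rest with
        | nil => exact absurd hp (pvLines_ne_nil rest)
        | cons h t =>
          simp [pvLines, hp]
      · have hpre : List.isPrefixOf ['\n'] (c :: rest) = false := by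
          simp [List.isPrefixOf]
          exact fun h => absurd h.symm hc
        simp only [hpre]
        rw [if_neg (by simp)]
        rw [ih rest (c :: cur) acc (by omega)]
        cases hp : pvLines rest with
        | nil => exact absurd hp (pvLines_ne_nil rest)
        | cons h t =>
          simp [pvLines, hc, hp, pvConsHead]

theorem pvSplitOn_eq_pvLines (s : List Char) : PySem.Chars.splitOn s ['\n'] = pvLines s := by
  unfold PySem.Chars.splitOn
  rw [pvGo_spec (s.length + 1) s [] [] (by omega)]
  cases hp : pvLines s with
  | nil => exact absurd hp (pvLines_ne_nil s)
  | cons h t => simp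

-- on a '\n'-free list, lstrip's whitespace set coincides with B's pvWsB
theorem pvDropWhile_ws (l : List Char) (h : '\n' ∉ l) :
    l.dropWhile PySem.Chars.isspace = l.dropWhile pvWsB := by
  induction l with
  | nil => rfl
  | cons c r ih =>
    have hc : c ≠ '\n' := fun he => h (by simp [he])
    have hr : '\n' ∉ r := fun hm => h (by simp [hm])
    have hb : pvWsB c = PySem.Chars.isspace c := by
      simp [pvWsB, hc]
    simp only [List.dropWhile_cons, hb]
    split
    · exact ih hr
    · rfl

theorem pvDropWhile_subset (p : Char → Bool) (l : List Char) : ∀ c ∈ l.dropWhile p, c ∈ l :=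
  fun _ hc => (List.dropWhile_sublist p).mem hc

-- A's comment test, rephrased through B's whitespace scan
theorem pvCommentTest (l : List Char) (h : '\n' ∉ l) :
    PySem.Chars.startswith (PySem.Chars.lstrip l) ['#'] =
      decide ((l.dropWhile pvWsB).head? = some '#') := by
  unfold PySem.Chars.startswith PySem.Chars.lstrip
  rw [pvDropWhile_ws l h]
  cases hd : l.dropWhile pvWsB with
  | nil => simp [List.isPrefixOf]
  | cons c u =>
    by_cases hc : c = '#'
    · subst hc; simp [List.isPrefixOf]
    · have h1 : ('#' == c) = false := beq_eq_false_iff_ne.mpr (Ne.symm hc)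
      simp [List.isPrefixOf, h1, hc]

-- A's blank test, rephrased through B's whitespace scan
theorem pvStripTest (l : List Char) (h : '\n' ∉ l) :
    (PySem.Chars.strip l = []) ↔ (l.dropWhile pvWsB = []) := by
  constructor
  · intro hs
    unfold PySem.Chars.strip PySem.Chars.rstrip PySem.Chars.lstrip at hs
    rw [List.reverse_eq_nil_iff, List.dropWhile_eq_nil_iff] at hs
    rw [List.dropWhile_eq_nil_iff]
    intro c hc
    have hsp : PySem.Chars.isspace c = true := by
      rcases List.mem_append.mp (by rw [List.takeWhile_append_dropWhile (p := PySem.Chars.isspace) (l := l)]; exact hc) with h1 | h2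
      · exact List.mem_takeWhile_imp h1
      · exact hs c (List.mem_reverse.mpr h2)
    have hcn : c ≠ '\n' := fun he => h (he ▸ hc)
    simp [pvWsB, hsp, hcn]
  · intro hb
    have hall : ∀ c ∈ l, PySem.Chars.isspace c = true := by
      intro c hc
      have := List.dropWhile_eq_nil_iff.mp hb c hc
      simp [pvWsB] at this
      exact this.1
    have hl : PySem.Chars.lstrip l = [] := by
      unfold PySem.Chars.lstrip
      exact List.dropWhile_eq_nil_iff.mpr hall
    unfold PySem.Chars.strip
    rw [hl]
    rfl

theorem pvDropWhile_no_nl_concat (u R : List Char) (h : '\n' ∉ u) :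
    (u ++ '\n' :: R).dropWhile (fun c => !(c == '\n')) = '\n' :: R := by
  rw [List.dropWhile_append_of_pos]
  · simp
  · intro c hc
    have : c ≠ '\n' := fun he => h (he ▸ hc)
    simp [this]

-- suffix of a line list is still made of the original lines
theorem pvDropCommentsA_mem : ∀ (lines : List (List Char)), ∀ l ∈ pvDropCommentsA lines, l ∈ lines := by
  intro lines
  induction lines with
  | nil => simp [pvDropCommentsA]
  | cons x ls ih =>
    simp only [pvDropCommentsA]
    split
    · intro l hl; exact List.mem_cons_of_mem x (ih l hl)
    · intro l hl; exact hl

-- pvWsB is false at '\n'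
theorem pvWsB_nl : pvWsB '\n' = false := by decide

theorem pvDropCommentsA_cons (l : List Char) (ls : List (List Char)) :
    pvDropCommentsA (l :: ls) =
      if PySem.Chars.startswith (PySem.Chars.lstrip l) ['#'] then pvDropCommentsA ls else l :: ls := rfl

theorem pvDropBlankA_cons (l : List Char) (ls : List (List Char)) :
    pvDropBlankA (l :: ls) = if PySem.Chars.strip l = [] then ls else l :: ls := rfl

-- the comment-skipping loops agree, line list vs character scan
theorem pvSkipComments_join : ∀ (lines : List (List Char)), lines ≠ [] →
    (∀ l ∈ lines, '\n' ∉ l) →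
    pvSkipComments (PySem.Chars.join ['\n'] lines) =
      PySem.Chars.join ['\n'] (pvDropCommentsA lines) := by
  intro lines
  induction lines with
  | nil => intro h; exact absurd rfl h
  | cons l ls ih =>
    intro _ hnl
    have hl : '\n' ∉ l := hnl l (by simp)
    cases ls with
    | nil =>
      rw [PySem.Chars.join_singleton]
      rw [pvSkipComments]
      simp only [pvDropCommentsA, pvCommentTest l hl]
      by_cases hc : (l.dropWhile pvWsB).head? = some '#'
      · rw [dif_pos hc]
        have hnil : pvDropLine (l.dropWhile pvWsB) = [] := by
          unfold pvDropLine
          have hdw : (l.dropWhile pvWsB).dropWhile (fun c => !(c == '\n')) = [] := by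
            rw [List.dropWhile_eq_nil_iff]
            intro c hcm
            have : c ≠ '\n' := fun he =>
              hl (he ▸ pvDropWhile_subset pvWsB l c hcm)
            simp [this]
          rw [hdw]
        rw [hnil]
        rw [pvSkipComments]
        simp [hc, PySem.Chars.join_nil]
      · rw [dif_neg hc]
        simp [hc, PySem.Chars.join_singleton]
    | cons l' ls' =>
      rw [PySem.Chars.join_cons_cons]
      rw [pvSkipComments]
      by_cases hc : (l.dropWhile pvWsB).head? = some '#'
      · -- the first line is a comment line
        obtain ⟨u, hu⟩ : ∃ u, l.dropWhile pvWsB = '#' :: u := by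
          cases hd : l.dropWhile pvWsB with
          | nil => rw [hd] at hc; simp at hc
          | cons c u =>
            rw [hd] at hc; simp at hc
            exact ⟨u, by rw [hc]⟩
        have hdw : (l ++ ['\n'] ++ PySem.Chars.join ['\n'] (l' :: ls')).dropWhile pvWsB
            = '#' :: (u ++ '\n' :: PySem.Chars.join ['\n'] (l' :: ls')) := by
          rw [List.append_assoc, List.dropWhile_append, hu]
          simp
        rw [hdw]
        rw [dif_pos (by simp)]
        have hunl : '\n' ∉ ('#' :: u) := fun hm =>
          hl (pvDropWhile_subset pvWsB l '\n' (hu ▸ hm))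
        have hline : pvDropLine ('#' :: (u ++ '\n' :: PySem.Chars.join ['\n'] (l' :: ls')))
            = PySem.Chars.join ['\n'] (l' :: ls') := by
          unfold pvDropLine
          rw [← List.cons_append]
          rw [pvDropWhile_no_nl_concat _ _ hunl]
        rw [hline]
        conv_rhs => rw [pvDropCommentsA_cons, pvCommentTest l hl, if_pos (by rw [hc]; simp)]
        exact ih (by simp) (fun x hx => hnl x (by simp [hx]))
      · -- the first line is not a comment line: both sides stop here
        have hc2 : ((l ++ ['\n'] ++ PySem.Chars.join ['\n'] (l' :: ls')).dropWhile pvWsB).head? ≠ some '#' := by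
          rw [List.append_assoc, List.dropWhile_append]
          cases hd : l.dropWhile pvWsB with
          | nil =>
            simp only [List.isEmpty_nil, if_pos]
            simp [pvWsB_nl]
          | cons c u =>
            rw [hd] at hc
            simp at hc
            simp [hc]
        rw [dif_neg hc2]
        rw [pvDropCommentsA_cons, pvCommentTest l hl, if_neg (by simpa using hc),
          PySem.Chars.join_cons_cons]

-- the blank-line steps agree, line list vs character scan
theorem pvSkipBlank_join : ∀ (lines : List (List Char)), (∀ l ∈ lines, '\n' ∉ l) →
    pvSkipBlank (PySem.Chars.join ['\n'] lines) =
      PySem.Chars.join ['\n'] (pvDropBlankA lines) := by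
  intro lines hnl
  cases lines with
  | nil => simp [PySem.Chars.join_nil, pvSkipBlank, pvDropBlankA]
  | cons l ls =>
    have hl : '\n' ∉ l := hnl l (by simp)
    cases ls with
    | nil =>
      rw [PySem.Chars.join_singleton]
      unfold pvSkipBlank
      simp only [pvDropBlankA]
      by_cases hb : l.dropWhile pvWsB = []
      · rw [hb, if_pos ((pvStripTest l hl).mpr hb)]
        simp [PySem.Chars.join_nil]
      · rw [if_neg (fun hs => hb ((pvStripTest l hl).mp hs))]
        cases hd : l.dropWhile pvWsB with
        | nil => exact absurd hd hb
        | cons c u =>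
          have hcn : c ≠ '\n' := fun he =>
            hl (he ▸ pvDropWhile_subset pvWsB l c (by simp [hd]))
          simp [hcn, PySem.Chars.join_singleton]
    | cons l' ls' =>
      rw [PySem.Chars.join_cons_cons]
      unfold pvSkipBlank
      rw [pvDropBlankA_cons]
      by_cases hb : l.dropWhile pvWsB = []
      · rw [if_pos ((pvStripTest l hl).mpr hb)]
        rw [List.append_assoc, List.dropWhile_append, hb]
        simp [pvWsB_nl]
      · rw [if_neg (fun hs => hb ((pvStripTest l hl).mp hs))]
        cases hd : l.dropWhile pvWsB with
        | nil => exact absurd hd hb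
        | cons c u =>
          have hcn : c ≠ '\n' := fun he =>
            hl (he ▸ pvDropWhile_subset pvWsB l c (by simp [hd]))
          rw [List.append_assoc, List.dropWhile_append, hd]
          simp [hcn, PySem.Chars.join_cons_cons]

-- ===== VERDICT (by name: the statement is the Claim_ definition above) =====
theorem podmien_top_comment_spec : Claim_equal_podmien_top_comment := by
  intro yaml_str kod_jezyka _
  unfold Spec_podmien_top_comment podmien_top_comment podmien_top_comment_alt
  have hkey : pvSkipBlank (pvSkipComments yaml_str.toList) =
      PySem.Chars.join ['\n'] (pvDropBlankA (pvDropCommentsA (PySem.Chars.splitOn yaml_str.toList ['\n']))) := by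
    rw [pvSplitOn_eq_pvLines]
    conv_lhs => rw [← pvJoin_pvLines yaml_str.toList]
    rw [pvSkipComments_join (pvLines yaml_str.toList) (pvLines_ne_nil _) (pvLines_no_nl _)]
    rw [pvSkipBlank_join _ (fun l hl => pvLines_no_nl yaml_str.toList l (pvDropCommentsA_mem _ l hl))]
  rw [hkey]
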